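-- pv_equiv track=rewrite | github.com/Yugdes/ES335_25_Assignment_3 | dataset1_app.py | handle_oov_word
-- ===== SOURCE A (Python) =====
-- def handle_oov_word(word, word_to_idx):
--     """Handle out-of-vocabulary words"""
--     # Try lowercase
--     if word.lower() in word_to_idx:
--         return word.lower()
--
--     # Try capitalized
--     if word.capitalize() in word_to_idx:
--         return word.capitalize()
--
--     # Try uppercase
--     if word.upper() in word_to_idx:
--         return word.upper()
--
--     # Use unknown token or random word
--     if '<unk>' in word_to_idx:
--         return '<unk>'
--     elif '<UNK>' in word_to_idx:
--         return '<UNK>'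
--     else:
--         # Return a random common word from vocabulary
--         common_words = ['the', 'a', 'and', 'of', 'to', 'in', 'that', 'was']
--         for cw in common_words:
--             if cw in word_to_idx:
--                 return cw
--         # Last resort: return first word in vocabulary
--         return list(word_to_idx.keys())[0]
-- ===== SOURCE B (Python) =====
-- def handle_oov_word(word, word_to_idx):
--     """Handle OOV words by a single argmin scan over the vocabulary.
--
--     Build a priority dict mapping each candidate string to its rank, then make
--     ONE pass over the vocabulary keys keeping the key with the lowest rank.
--     Falls back to the first vocabulary key when no key is a candidate.
--     """
--     priority = {}
--     for i, c in enumerate([word.lower(), word.capitalize(), word.upper(),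
--                            '<unk>', '<UNK>',
--                            'the', 'a', 'and', 'of', 'to', 'in', 'that', 'was']):
--         priority.setdefault(c, i)
--     best = None  # (rank, key) with the smallest rank seen so far
--     for k in word_to_idx:
--         r = priority.get(k)
--         if r is not None and (best is None or r < best[0]):
--             best = (r, k)
--     if best is not None:
--         return best[1]
--     return next(iter(word_to_idx))
-- ===== Notes on version B (the rewrite author's own statement) =====
-- stated objective: alternative
-- what changed: Instead of A's cascade of membership tests over candidate strings, B builds a priority dict mapping each candidate to its rank and makes one argmin pass over the vocabulary keys, returning the lowest-ranked key (fallback: the first key).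
import Mathlib
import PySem

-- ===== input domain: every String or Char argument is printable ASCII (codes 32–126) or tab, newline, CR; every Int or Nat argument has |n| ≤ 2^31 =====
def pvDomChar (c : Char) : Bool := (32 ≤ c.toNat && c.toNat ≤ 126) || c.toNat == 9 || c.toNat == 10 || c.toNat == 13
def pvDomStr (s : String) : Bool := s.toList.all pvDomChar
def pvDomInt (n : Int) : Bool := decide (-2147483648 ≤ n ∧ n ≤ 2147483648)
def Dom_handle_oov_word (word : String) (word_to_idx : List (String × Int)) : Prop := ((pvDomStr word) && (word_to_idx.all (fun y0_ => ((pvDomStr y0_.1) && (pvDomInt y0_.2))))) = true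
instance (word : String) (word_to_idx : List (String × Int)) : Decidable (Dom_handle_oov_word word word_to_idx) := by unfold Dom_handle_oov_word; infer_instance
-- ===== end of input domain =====

-- B replaces A's cascade of membership tests over candidates by ONE argmin pass over the
-- vocabulary keys ranked through a precomputed priority dict (objective: alternative).

-- ===== PORT A =====
-- shared helpers: Python str.capitalize() (exact on the ASCII domain) and dict key-membership 'k in d'
def pyCapitalize (s : String) : String :=
  match s.toList with
  | [] => ""
  | c :: rest => String.ofList (PySem.Chars.upperChar c :: rest.map PySem.Chars.lowerChar)

def keysOf (d : List (String × Int)) : List String := d.map (·.1)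

def hasKey (d : List (String × Int)) (k : String) : Bool := (keysOf d).contains k

-- A's 'for cw in common_words' loop, then the last resort list(d.keys())[0] (empty dict is outside Pre_)
def aCommonLoop (d : List (String × Int)) : List String → String
  | [] => ((keysOf d).headD "")
  | cw :: rest => if hasKey d cw then cw else aCommonLoop d rest

def handle_oov_word (word : String) (word_to_idx : List (String × Int)) : String :=
  if hasKey word_to_idx (PySem.Str.lower word) then PySem.Str.lower word
  else if hasKey word_to_idx (pyCapitalize word) then pyCapitalize word
  else if hasKey word_to_idx (PySem.Str.upper word) then PySem.Str.upper word
  else if hasKey word_to_idx "<unk>" then "<unk>"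
  else if hasKey word_to_idx "<UNK>" then "<UNK>"
  else aCommonLoop word_to_idx ["the", "a", "and", "of", "to", "in", "that", "was"]

-- ===== PORT B =====
def bCandidates (word : String) : List String :=
  [PySem.Str.lower word, pyCapitalize word, PySem.Str.upper word,
   "<unk>", "<UNK>", "the", "a", "and", "of", "to", "in", "that", "was"]

-- 'for i, c in enumerate(...): priority.setdefault(c, i)'
def bPriority (cs : List String) : PySem.Dict String Int :=
  (PySem.List.enumerate cs).foldl (fun d p => d.setdefault p.2 p.1) PySem.Dict.empty

-- one step of the argmin loop over the vocabulary keys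
def bStep (prio : PySem.Dict String Int) (best : Option (Int × String)) (k : String) : Option (Int × String) :=
  match prio.get? k with
  | none => best
  | some r =>
    match best with
    | none => some (r, k)
    | some (br, bk) => if r < br then some (r, k) else some (br, bk)

def handle_oov_word_alt (word : String) (word_to_idx : List (String × Int)) : String :=
  let prio := bPriority (bCandidates word)
  match (keysOf word_to_idx).foldl (bStep prio) none with
  | some (_, k) => k
  | none => ((keysOf word_to_idx).headD "")   -- next(iter(word_to_idx)); empty dict outside Pre_

-- ===== PRECONDITION & SPEC =====
-- Pre_ excludes only the empty dict, on which A raises IndexError (and B raises StopIteration).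
def Pre_handle_oov_word (word : String) (word_to_idx : List (String × Int)) : Prop := word_to_idx ≠ []
instance (word : String) (word_to_idx : List (String × Int)) : Decidable (Pre_handle_oov_word word word_to_idx) := by unfold Pre_handle_oov_word; infer_instance
def pvWitness_handle_oov_word : String × (List (String × Int)) := ("Hello", [("hello", 3), ("the", 0)])

def Spec_handle_oov_word (word : String) (word_to_idx : List (String × Int)) (out : String) : Prop := out = handle_oov_word_alt word word_to_idx
instance (word : String) (word_to_idx : List (String × Int)) (out : String) : Decidable (Spec_handle_oov_word word word_to_idx out) := by unfold Spec_handle_oov_word; infer_instance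

-- ===== CLAIM (what is proved, stated in full; the proofs are below) =====
def Claim_equal_handle_oov_word : Prop := ∀ (word : String) (word_to_idx : List (String × Int)), Dom_handle_oov_word word word_to_idx → Pre_handle_oov_word word word_to_idx → Spec_handle_oov_word word word_to_idx (handle_oov_word word word_to_idx)

-- ===== LEMMAS AND PROOFS =====

-- first index (as an Int) of k in a list of candidates
def firstIdx (k : String) : List String → Option Int
  | [] => none
  | c :: cs => if c = k then some 0 else (firstIdx k cs).map (· + 1)

-- the priority dict computes the first index of each candidate
theorem bPriority_get_aux (k : String) : ∀ (cs : List String) (n : Int) (d0 : PySem.Dict String Int),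
    ((PySem.List.enumerate cs n).foldl (fun d p => d.setdefault p.2 p.1) d0).get? k =
      match d0.get? k with
      | some v => some v
      | none => (firstIdx k cs).map (· + n) := by
  intro cs
  induction cs with
  | nil =>
    intro n d0
    simp [PySem.List.enumerate_nil, firstIdx]
    cases d0.get? k <;> rfl
  | cons c cs ih =>
    intro n d0
    rw [PySem.List.enumerate_cons]
    simp only [List.foldl_cons]
    rw [ih]
    by_cases hck : c = k
    · subst hck
      rw [PySem.Dict.get?_setdefault_self]
      cases h0 : d0.get? c <;> simp [firstIdx]
    · rw [PySem.Dict.get?_setdefault_of_ne d0 n (show k ≠ c from fun h => hck h.symm)]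
      cases h0 : d0.get? k with
      | some v => rfl
      | none =>
        simp [firstIdx, hck]
        cases firstIdx k cs with
        | none => rfl
        | some r => simp; ring

theorem bPriority_get (cs : List String) (k : String) :
    (bPriority cs).get? k = firstIdx k cs := by
  unfold bPriority
  rw [bPriority_get_aux]
  have hempty : (PySem.Dict.empty : PySem.Dict String Int).get? k = none := rfl
  rw [hempty]
  cases firstIdx k cs <;> simp

-- basic facts about firstIdx
theorem firstIdx_nonneg {k : String} : ∀ {cs : List String} {r : Int}, firstIdx k cs = some r → 0 ≤ r := by
  intro cs
  induction cs with
  | nil => intro r h; simp [firstIdx] at h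
  | cons c cs ih =>
    intro r h
    by_cases hck : c = k
    · simp [firstIdx, hck] at h; omega
    · simp [firstIdx, hck] at h
      obtain ⟨r', hr', rfl⟩ := h
      have := ih hr'; omega

theorem firstIdx_getElem? {k : String} : ∀ {cs : List String} {r : Int}, firstIdx k cs = some r →
    cs[r.toNat]? = some k := by
  intro cs
  induction cs with
  | nil => intro r h; simp [firstIdx] at h
  | cons c cs ih =>
    intro r h
    by_cases hck : c = k
    · simp [firstIdx, hck] at h
      subst h; simpa using hck
    · simp [firstIdx, hck] at h
      obtain ⟨r', hr', rfl⟩ := h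
      have h0 := firstIdx_nonneg hr'
      have htn : (r' + 1).toNat = r'.toNat + 1 := by omega
      rw [htn]
      simpa using ih hr'

-- A's cascade = first candidate present, else first key
def afind (d : List (String × Int)) : List String → String
  | [] => ((keysOf d).headD "")
  | c :: rest => if hasKey d c then c else afind d rest

theorem afind_eq_find? (d : List (String × Int)) : ∀ (cs : List String),
    afind d cs = match cs.find? (fun c => hasKey d c) with
                 | some c => c
                 | none => ((keysOf d).headD "") := by
  intro cs
  induction cs with
  | nil => rfl
  | cons c cs ih =>
    by_cases h : hasKey d c <;> simp [afind, List.find?, h, ih]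

theorem handle_eq_afind (word : String) (d : List (String × Int)) :
    handle_oov_word word d = afind d (bCandidates word) := by
  unfold handle_oov_word bCandidates
  by_cases h1 : hasKey d (PySem.Str.lower word) <;>
    by_cases h2 : hasKey d (pyCapitalize word) <;>
      by_cases h3 : hasKey d (PySem.Str.upper word) <;>
        simp [afind, aCommonLoop, h1, h2, h3]

-- if no key has a rank, the fold stays put
theorem fold_none (P : PySem.Dict String Int) : ∀ (keys : List String) (b : Option (Int × String)),
    (∀ k ∈ keys, P.get? k = none) → keys.foldl (bStep P) b = b := by
  intro keys
  induction keys with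
  | nil => intro b _; rfl
  | cons k keys ih =>
    intro b h
    simp only [List.foldl_cons]
    rw [show bStep P b k = b by simp [bStep, h k (by simp)]]
    exact ih b (fun x hx => h x (by simp [hx]))

-- invariant: the accumulator, if set, holds a true rank ≥ i0
def BInv (P : PySem.Dict String Int) (i0 : Int) (b : Option (Int × String)) : Prop :=
  b = none ∨ ∃ r k, b = some (r, k) ∧ P.get? k = some r ∧ i0 ≤ r

theorem inv_step (P : PySem.Dict String Int) (i0 : Int) (b : Option (Int × String)) (k : String)
    (hb : BInv P i0 b) (hk : ∀ r, P.get? k = some r → i0 ≤ r) : BInv P i0 (bStep P b k) := by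
  cases hP : P.get? k with
  | none =>
    have : bStep P b k = b := by simp [bStep, hP]
    rw [this]; exact hb
  | some r =>
    have hir := hk r hP
    rcases hb with rfl | ⟨r', k', rfl, hP', hi'⟩
    · exact Or.inr ⟨r, k, by simp [bStep, hP], hP, hir⟩
    · by_cases hlt : r < r'
      · exact Or.inr ⟨r, k, by simp [bStep, hP, hlt], hP, hir⟩
      · exact Or.inr ⟨r', k', by simp [bStep, hP, hlt], hP', hi'⟩

-- once the accumulator is (i0, c), it never changes (all ranks are ≥ i0)
theorem fold_keeps (P : PySem.Dict String Int) (i0 : Int) (c : String) : ∀ (keys : List String),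
    (∀ k ∈ keys, ∀ r, P.get? k = some r → i0 ≤ r) →
    keys.foldl (bStep P) (some (i0, c)) = some (i0, c) := by
  intro keys
  induction keys with
  | nil => intro _; rfl
  | cons k keys ih =>
    intro h
    simp only [List.foldl_cons]
    have hstep : bStep P (some (i0, c)) k = some (i0, c) := by
      cases hP : P.get? k with
      | none => simp [bStep, hP]
      | some r =>
        have : ¬ r < i0 := by have := h k (by simp) r hP; omega
        simp [bStep, hP, this]
    rw [hstep]
    exact ih (fun x hx => h x (by simp [hx]))

-- main fold lemma: if c ∈ keys, rank c = i0, all ranks ≥ i0 and rank-i0 keys equal c,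
-- then the argmin fold returns (i0, c)
theorem fold_finds (P : PySem.Dict String Int) (i0 : Int) (c : String) (hc : P.get? c = some i0)
    (huniq : ∀ k r, P.get? k = some r → r = i0 → k = c) :
    ∀ (keys : List String) (b : Option (Int × String)), BInv P i0 b →
    (∀ k ∈ keys, ∀ r, P.get? k = some r → i0 ≤ r) → c ∈ keys →
    keys.foldl (bStep P) b = some (i0, c) := by
  intro keys
  induction keys with
  | nil => intro b _ _ hmem; simp at hmem
  | cons k keys ih =>
    intro b hb hrank hmem
    simp only [List.foldl_cons]
    by_cases hkc : k = c
    · subst hkc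
      have hres : bStep P b k = some (i0, k) := by
        rcases hb with rfl | ⟨r', k', rfl, hP', hi'⟩
        · simp [bStep, hc]
        · by_cases hlt : i0 < r'
          · simp [bStep, hc, hlt]
          · have hr' : r' = i0 := by omega
            have hk'c : k' = k := huniq k' r' hP' hr'
            subst hk'c
            simp [bStep, hc, hr']
      rw [hres]
      exact fold_keeps P i0 k keys (fun x hx => hrank x (by simp [hx]))
    · have hmem' : c ∈ keys := by
        rcases List.mem_cons.mp hmem with h | h
        · exact absurd h.symm hkc
        · exact h
      exact ih (bStep P b k) (inv_step P i0 b k hb (hrank k (by simp)))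
        (fun x hx => hrank x (by simp [hx])) hmem'

-- find? = some c decomposition: a prefix of failures, then c satisfying p
theorem find?_decomp {α : Type} (p : α → Bool) : ∀ (l : List α) (c : α), l.find? p = some c →
    ∃ pre post, l = pre ++ c :: post ∧ (∀ x ∈ pre, p x = false) ∧ p c = true := by
  intro l
  induction l with
  | nil => intro c h; simp at h
  | cons a l ih =>
    intro c h
    by_cases hp : p a
    · rw [List.find?_cons_of_pos hp] at h
      have : a = c := by simpa using h
      subst this
      exact ⟨[], l, rfl, by simp, hp⟩
    · rw [List.find?_cons_of_neg (by simpa using hp)] at h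
      obtain ⟨pre, post, rfl, hpre, hc⟩ := ih c h
      exact ⟨a :: pre, post, rfl, by simpa [hp] using hpre, hc⟩

-- firstIdx of c in pre ++ c :: post when c ∉ pre
theorem firstIdx_append {c : String} : ∀ (pre post : List String), c ∉ pre →
    firstIdx c (pre ++ c :: post) = some (pre.length : Int) := by
  intro pre
  induction pre with
  | nil => intro post _; simp [firstIdx]
  | cons a pre ih =>
    intro post hnot
    have ha : a ≠ c := by intro h; exact hnot (by simp [h])
    simp only [List.cons_append, firstIdx, ha, if_false]
    rw [ih post (fun h => hnot (by simp [h]))]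
    simp

-- the central equivalence of the two result expressions
theorem main_eq (cs : List String) (d : List (String × Int)) :
    (match (keysOf d).foldl (bStep (bPriority cs)) none with
     | some (_, k) => k
     | none => ((keysOf d).headD "")) = afind d cs := by
  rw [afind_eq_find? d cs]
  cases hf : cs.find? (fun c => hasKey d c) with
  | none =>
    have hnone : ∀ k ∈ keysOf d, (bPriority cs).get? k = none := by
      intro k hk
      rw [bPriority_get]
      cases hfi : firstIdx k cs with
      | none => rfl
      | some r =>
        have hmem : k ∈ cs := List.mem_of_getElem? (firstIdx_getElem? hfi)
        have hnk := List.find?_eq_none.mp hf k hmem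
        simp [hasKey] at hnk
        exact absurd hk hnk
    rw [fold_none _ (keysOf d) none hnone]
  | some c =>
    obtain ⟨pre, post, hsplit, hpre, hc⟩ := find?_decomp _ cs c hf
    have hcin : c ∈ keysOf d := by simpa [hasKey] using hc
    have hcpre : c ∉ pre := by
      intro h
      have := hpre c h
      simp [hasKey] at this
      exact absurd hcin this
    have hrc : (bPriority cs).get? c = some (pre.length : Int) := by
      rw [bPriority_get, hsplit]; exact firstIdx_append pre post hcpre
    have hrank : ∀ k ∈ keysOf d, ∀ r, (bPriority cs).get? k = some r → (pre.length : Int) ≤ r := by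
      intro k hk r hr
      rw [bPriority_get] at hr
      have hget := firstIdx_getElem? hr
      have h0 := firstIdx_nonneg hr
      by_contra hcon
      have hlt' : r.toNat < pre.length := by omega
      rw [hsplit, List.getElem?_append_left hlt'] at hget
      have : k ∈ pre := List.mem_of_getElem? hget
      have hfalse := hpre k this
      simp [hasKey] at hfalse
      exact absurd hk hfalse
    have huniq : ∀ k r, (bPriority cs).get? k = some r → r = (pre.length : Int) → k = c := by
      intro k r hr hri
      subst hri
      rw [bPriority_get] at hr
      have hget := firstIdx_getElem? hr
      have hcast : ((pre.length : Int)).toNat = pre.length := by simp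
      rw [hsplit, hcast] at hget
      have h1 : ((pre ++ c :: post))[pre.length]? = some c := by
        rw [List.getElem?_append_right (le_refl _)]; simp
      rw [h1] at hget
      exact (Option.some.inj hget).symm
    rw [fold_finds (bPriority cs) (pre.length : Int) c hrc huniq (keysOf d) none (Or.inl rfl) hrank hcin]

-- ===== VERDICT (by name: the statement is the Claim_ definition above) =====
theorem handle_oov_word_spec : Claim_equal_handle_oov_word := by
  intro word d _ _
  unfold Spec_handle_oov_word handle_oov_word_alt
  rw [handle_eq_afind word d, ← main_eq (bCandidates word) d]
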